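-- pv_equiv track=rewrite | github.com/k23rs125/gtfs-jp-creator | skills/gtfs-jp-creator/scripts/generate_shapes.py | build_trip_stop_sequences
-- ===== SOURCE A (Python) =====
-- def build_trip_stop_sequences(stop_times: list[dict]) -> dict[str, list[str]]:
--     """stop_times を trip_id 別に集約して、stop_sequence 順の stop_id 列を返す。"""
--     by_trip: dict[str, list[tuple[int, str]]] = {}
--     for row in stop_times:
--         trip_id = row.get("trip_id")
--         stop_id = row.get("stop_id")
--         try:
--             seq = int(row.get("stop_sequence") or 0)
--         except (ValueError, TypeError):
--             seq = 0
--         if not trip_id or not stop_id: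
--             continue
--         by_trip.setdefault(trip_id, []).append((seq, stop_id))
--
--     result: dict[str, list[str]] = {}
--     for trip_id, pairs in by_trip.items():
--         pairs.sort(key=lambda x: x[0])
--         result[trip_id] = [stop_id for _, stop_id in pairs]
--     return result
-- ===== SOURCE B (Python) =====
-- def build_trip_stop_sequences(stop_times: list[dict]) -> dict[str, list[str]]:
--     """One global stable sort by stop_sequence, then a flat grouping pass (no per-trip sorts)."""
--     def seq_key(row):
--         try:
--             return int(row.get("stop_sequence") or 0)
--         except (ValueError, TypeError):
--             return 0
--
--     result: dict[str, list[str]] = {}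
--     # first pass fixes the key order (first appearance of each valid trip)
--     for row in stop_times:
--         if row.get("trip_id") and row.get("stop_id"):
--             result[row["trip_id"]] = []
--     # one global stable sort, then append each stop to its trip
--     for row in sorted(stop_times, key=seq_key):
--         trip_id = row.get("trip_id")
--         stop_id = row.get("stop_id")
--         if trip_id and stop_id:
--             result[trip_id].append(stop_id)
--     return result
-- ===== Notes on version B (the rewrite author's own statement) =====
-- stated objective: alternative
-- what changed: Replaces per-trip collect-then-sort (dict of (seq,stop) lists, each sorted separately) by one global stable sort of all rows on the seq key followed by a flat grouping pass; stability makes each trip's subsequence identical.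
import Mathlib
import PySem

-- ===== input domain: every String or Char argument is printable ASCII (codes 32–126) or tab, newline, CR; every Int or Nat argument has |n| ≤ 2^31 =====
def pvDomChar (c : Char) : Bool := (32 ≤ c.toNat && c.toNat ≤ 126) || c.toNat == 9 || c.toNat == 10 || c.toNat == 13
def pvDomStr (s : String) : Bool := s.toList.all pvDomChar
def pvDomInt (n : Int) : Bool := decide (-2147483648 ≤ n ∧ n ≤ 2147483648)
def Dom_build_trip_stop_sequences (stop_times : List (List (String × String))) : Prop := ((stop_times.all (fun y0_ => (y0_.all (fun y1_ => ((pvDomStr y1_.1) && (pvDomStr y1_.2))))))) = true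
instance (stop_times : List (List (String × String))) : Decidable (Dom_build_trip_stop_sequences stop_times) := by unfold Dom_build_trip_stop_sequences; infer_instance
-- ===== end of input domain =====

-- B replaces A's per-trip collect-then-sort by ONE global stable sort on the seq key plus a flat
-- grouping pass (alternative decomposition, same return value).

-- ===== PORT A =====
-- row.get(k): first-match lookup in the association list (Python dicts have unique keys)
def pvRowGet (row : List (String × String)) (k : String) : Option String :=
  (PySem.Dict.mk row).get? k

-- Python truthiness of an Optional[str]
def pvTruthy : Option String → Bool
  | none => false
  | some s => s != ""

-- seq = int(row.get("stop_sequence") or 0), with ValueError -> 0  (shared: Source B computes the same key)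
def pvSeq (row : List (String × String)) : Int :=
  match pvRowGet row "stop_sequence" with
  | none => 0
  | some s => if s == "" then 0 else (PySem.Int.ofStr? s).getD 0

-- loop body of A's first loop: skip rows with falsy trip_id/stop_id, else setdefault-append (seq, stop_id)
def pvStepA (d : PySem.Dict String (List (Int × String))) (row : List (String × String)) :
    PySem.Dict String (List (Int × String)) :=
  if pvTruthy (pvRowGet row "trip_id") && pvTruthy (pvRowGet row "stop_id") then
    d.modify ((pvRowGet row "trip_id").getD "") []
      (fun v => v ++ [(pvSeq row, (pvRowGet row "stop_id").getD "")])
  else d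

def build_trip_stop_sequences (stop_times : List (List (String × String))) :
    List (String × List String) :=
  let by_trip := stop_times.foldl pvStepA PySem.Dict.empty
  -- second loop: pairs.sort(key=fst) then keep the stop_ids
  let result := by_trip.items.foldl
      (fun r p => r.insert p.1 ((PySem.List.sorted p.2 (fun x => x.1)).map (fun x => x.2)))
      (PySem.Dict.empty : PySem.Dict String (List String))
  result.items

-- ===== PORT B =====
-- Source B first pass: result[trip_id] = [] for every valid row (fixes first-appearance key order)
def pvStepB0 (d : PySem.Dict String (List String)) (row : List (String × String)) :
    PySem.Dict String (List String) :=
  if pvTruthy (pvRowGet row "trip_id") && pvTruthy (pvRowGet row "stop_id") then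
    d.insert ((pvRowGet row "trip_id").getD "") []
  else d

-- Source B second pass: result[trip_id].append(stop_id) (key present after pass 1)
def pvStepB (d : PySem.Dict String (List String)) (row : List (String × String)) :
    PySem.Dict String (List String) :=
  if pvTruthy (pvRowGet row "trip_id") && pvTruthy (pvRowGet row "stop_id") then
    d.modify ((pvRowGet row "trip_id").getD "") [] (fun v => v ++ [(pvRowGet row "stop_id").getD ""])
  else d

def build_trip_stop_sequences_alt (stop_times : List (List (String × String))) :
    List (String × List String) :=
  let result0 := stop_times.foldl pvStepB0 PySem.Dict.empty
  let result := (PySem.List.sorted stop_times pvSeq).foldl pvStepB result0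
  result.items

-- ===== PRECONDITION & SPEC =====
def Spec_build_trip_stop_sequences (stop_times : List (List (String × String))) (out : List (String × List String)) : Prop := out = build_trip_stop_sequences_alt stop_times
instance (stop_times : List (List (String × String))) (out : List (String × List String)) : Decidable (Spec_build_trip_stop_sequences stop_times out) := by unfold Spec_build_trip_stop_sequences; infer_instance

-- ===== CLAIM (what is proved, stated in full; the proofs are below) =====
def Claim_equal_build_trip_stop_sequences : Prop := ∀ (stop_times : List (List (String × String))), Dom_build_trip_stop_sequences stop_times → Spec_build_trip_stop_sequences stop_times (build_trip_stop_sequences stop_times)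

-- ===== LEMMAS AND PROOFS =====

def pvValid (row : List (String × String)) : Bool :=
  pvTruthy (pvRowGet row "trip_id") && pvTruthy (pvRowGet row "stop_id")

def pvTrip (row : List (String × String)) : String := (pvRowGet row "trip_id").getD ""
def pvStop (row : List (String × String)) : String := (pvRowGet row "stop_id").getD ""

-- a guarded fold is the fold over the filtered list
theorem pv_foldl_guard {α β : Type} (p : β → Bool) (f : α → β → α) (l : List β) (init : α) :
    l.foldl (fun a x => if p x then f a x else a) init = (l.filter p).foldl f init :=
  List.foldl_filter.symm

theorem pv_getD_fold_modify {β γ : Type} (l : List β) (k : β → String) (v : β → γ)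
    (d : PySem.Dict String (List γ)) (t : String) :
    (l.foldl (fun d r => d.modify (k r) [] (fun xs => xs ++ [v r])) d).getD t []
      = d.getD t [] ++ (l.filter (fun r => k r == t)).map v := by
  have h := PySem.Dict.getD_foldl_modify_append (l.map (fun r => (k r, v r))) d t
  rw [List.foldl_map] at h
  simpa [List.filter_map, Function.comp] using h

theorem pv_getD_fold_insert_nil {β : Type} (l : List β) (k : β → String)
    (d : PySem.Dict String (List String)) (t : String) (hd : d.getD t [] = []) :
    (l.foldl (fun d r => d.insert (k r) []) d).getD t [] = [] := by
  induction l generalizing d with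
  | nil => simpa using hd
  | cons r rs ih =>
    simp only [List.foldl_cons]
    apply ih
    rw [PySem.Dict.getD_insert]
    split_ifs <;> simp [hd]

theorem pv_update_of_subset (s : PySem.Set String) (l : List String)
    (h : ∀ x ∈ l, x ∈ s) : PySem.Set.update s l = s := by
  induction l generalizing s with
  | nil => rfl
  | cons x xs ih =>
    have hmem : x ∈ s := h x (by simp)
    have hadd : s.add x = s := by simp [PySem.Set.add, hmem]
    simp only [PySem.Set.update, List.foldl_cons]
    rw [show List.foldl PySem.Set.add (s.add x) xs = PySem.Set.update (s.add x) xs from rfl, hadd]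
    exact ih s (fun y hy => h y (by simp [hy]))

theorem pv_map_insertBy {α β : Type} (f : β → α) (b : α → α → Bool) (x : β) (l : List β) :
    PySem.List.insertBy b (f x) (l.map f)
      = (PySem.List.insertBy (fun u v => b (f u) (f v)) x l).map f := by
  induction l with
  | nil => rfl
  | cons y t ih =>
    simp only [List.map_cons, PySem.List.insertBy]
    by_cases hb : b (f x) (f y) = true
    · simp [hb]
    · simp [hb, ih]

theorem pv_sorted_map {α β κ : Type} [LinearOrder κ] (f : β → α) (key : α → κ) (l : List β) :
    PySem.List.sorted (l.map f) key = (PySem.List.sorted l (fun r => key (f r))).map f := by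
  rw [PySem.List.sorted_eq_foldl_insertBy, PySem.List.sorted_eq_foldl_insertBy, List.foldl_map]
  suffices h : ∀ acc : List β,
      l.foldl (fun a x => PySem.List.insertBy (fun u v => decide (key u < key v)) (f x) a) (acc.map f)
        = (l.foldl (fun a x => PySem.List.insertBy (fun u v => decide (key (f u) < key (f v))) x a) acc).map f by
    simpa using h []
  induction l with
  | nil => intro acc; rfl
  | cons y t ih =>
    intro acc
    simp only [List.foldl_cons]
    rw [pv_map_insertBy f (fun u v => decide (key u < key v)) y acc]
    exact ih _

theorem pv_insertBy_front {α κ : Type} [LinearOrder κ] (key : α → κ) (x : α) (l : List α)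
    (h : ∀ z ∈ l, key x < key z) :
    PySem.List.insertBy (fun a b => decide (key a < key b)) x l = x :: l := by
  cases l with
  | nil => rfl
  | cons y t => simp [PySem.List.insertBy, h y (by simp)]

theorem pv_filter_insertBy {α κ : Type} [LinearOrder κ] (key : α → κ) (p : α → Bool) (x : α)
    (ys : List α) (hs : ys.Pairwise (fun a b => key a ≤ key b)) :
    (PySem.List.insertBy (fun a b => decide (key a < key b)) x ys).filter p
      = if p x then PySem.List.insertBy (fun a b => decide (key a < key b)) x (ys.filter p)
        else ys.filter p := by
  induction ys with
  | nil => cases hpx : p x <;> simp [PySem.List.insertBy, hpx]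
  | cons y t ih =>
    have hy := (List.pairwise_cons.mp hs).1
    have hs' := (List.pairwise_cons.mp hs).2
    by_cases hlt : key x < key y
    · rw [show PySem.List.insertBy (fun a b => decide (key a < key b)) x (y :: t)
          = x :: y :: t by simp [PySem.List.insertBy, hlt]]
      cases hpx : p x with
      | false => simp [List.filter_cons, hpx]
      | true =>
        have hall : ∀ z ∈ (y :: t).filter p, key x < key z := by
          intro z hz
          have hz' := List.mem_of_mem_filter hz
          rcases List.mem_cons.mp hz' with h1 | h2
          · exact h1 ▸ hlt
          · exact lt_of_lt_of_le hlt (hy z h2)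
        rw [List.filter_cons_of_pos hpx, pv_insertBy_front key x _ hall]
        simp
    · rw [show PySem.List.insertBy (fun a b => decide (key a < key b)) x (y :: t)
          = y :: PySem.List.insertBy (fun a b => decide (key a < key b)) x t by
            simp [PySem.List.insertBy, hlt]]
      cases hpy : p y with
      | false =>
        rw [List.filter_cons_of_neg (by simp [hpy]), List.filter_cons_of_neg (by simp [hpy]),
          ih hs']
      | true =>
        rw [List.filter_cons_of_pos hpy, List.filter_cons_of_pos hpy, ih hs']
        cases hpx : p x with
        | false => simp
        | true =>
          rw [show PySem.List.insertBy (fun a b => decide (key a < key b)) x (y :: t.filter p)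
            = y :: PySem.List.insertBy (fun a b => decide (key a < key b)) x (t.filter p) by
              simp [PySem.List.insertBy, hlt]]
          simp

theorem pv_filter_sorted {α κ : Type} [LinearOrder κ] (key : α → κ) (p : α → Bool) (xs : List α) :
    (PySem.List.sorted xs key).filter p = PySem.List.sorted (xs.filter p) key := by
  induction xs using List.reverseRecOn with
  | nil => rfl
  | append_singleton l x ih =>
    have hstep : PySem.List.sorted (l ++ [x]) key
        = PySem.List.insertBy (fun a b => decide (key a < key b)) x (PySem.List.sorted l key) := by
      rw [PySem.List.sorted_eq_foldl_insertBy, PySem.List.sorted_eq_foldl_insertBy,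
        List.foldl_append]
      rfl
    rw [hstep, pv_filter_insertBy key p x _ (PySem.List.sorted_pairwise l key), List.filter_append]
    cases hpx : p x with
    | false =>
      simp only [List.filter_cons, hpx]
      simpa using ih
    | true =>
      simp only [List.filter_cons, hpx, if_true]
      simp only [List.filter_nil]
      rw [ih]
      rw [PySem.List.sorted_eq_foldl_insertBy, PySem.List.sorted_eq_foldl_insertBy,
        List.foldl_append]
      rfl

-- the per-trip value: A's collect-then-sort equals B's filter-of-globally-sorted
theorem pv_value_eq (valid : List (List (String × String))) (t : String) :
    (PySem.List.sorted ((valid.filter (fun r => pvTrip r == t)).map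
        (fun r => (pvSeq r, pvStop r))) (fun x => x.1)).map (fun x => x.2)
      = ((PySem.List.sorted valid pvSeq).filter (fun r => pvTrip r == t)).map pvStop := by
  rw [pv_filter_sorted pvSeq (fun r => pvTrip r == t) valid]
  rw [pv_sorted_map (fun r => (pvSeq r, pvStop r)) (fun x => x.1) (valid.filter (fun r => pvTrip r == t))]
  simp [List.map_map, Function.comp, pvStop]

theorem pv_main (st : List (List (String × String))) :
    build_trip_stop_sequences st = build_trip_stop_sequences_alt st := by
  -- abbreviations
  set valid := st.filter pvValid with hvdef
  set K := PySem.Set.ofList (valid.map pvTrip) with hKdef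
  -- ===== A side =====
  have hA1 : st.foldl pvStepA PySem.Dict.empty
      = valid.foldl (fun d r => d.modify (pvTrip r) []
          (fun xs => xs ++ [(pvSeq r, pvStop r)])) PySem.Dict.empty := by
    rw [hvdef, ← pv_foldl_guard pvValid]
    rfl
  have hkA : (st.foldl pvStepA PySem.Dict.empty).keys = K := by
    rw [hA1]
    have := PySem.Dict.keys_foldl_modify_key valid pvTrip ([] : List (Int × String))
      (fun _ r => fun xs => xs ++ [(pvSeq r, pvStop r)]) PySem.Dict.empty
    simpa using this
  have hnA : (st.foldl pvStepA PySem.Dict.empty).keys.Nodup := by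
    rw [hA1]
    exact PySem.Dict.nodup_keys_foldl_modify_key valid pvTrip ([] : List (Int × String))
      (fun _ r => fun xs => xs ++ [(pvSeq r, pvStop r)]) PySem.Dict.empty
      PySem.Dict.nodup_keys_empty
  have hgA : ∀ t, (st.foldl pvStepA PySem.Dict.empty).getD t []
      = (valid.filter (fun r => pvTrip r == t)).map (fun r => (pvSeq r, pvStop r)) := by
    intro t
    rw [hA1]
    simpa using pv_getD_fold_modify valid pvTrip (fun r => (pvSeq r, pvStop r)) PySem.Dict.empty t
  -- A's second loop over items with distinct keys
  have hAitems : build_trip_stop_sequences st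
      = K.map (fun t => (t,
          (PySem.List.sorted ((st.foldl pvStepA PySem.Dict.empty).getD t []) (fun x => x.1)).map
            (fun x => x.2))) := by
    show ((st.foldl pvStepA PySem.Dict.empty).items.foldl
        (fun r p => r.insert p.1 ((PySem.List.sorted p.2 (fun x => x.1)).map (fun x => x.2)))
        PySem.Dict.empty).items = _
    have hfresh := PySem.Dict.items_foldl_insert_fresh
      (st.foldl pvStepA PySem.Dict.empty).items Prod.fst
      (fun p => (PySem.List.sorted p.2 (fun x => x.1)).map (fun x => x.2))
      (PySem.Dict.empty : PySem.Dict String (List String))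
      (fun a _ => PySem.Dict.contains_empty a.1)
      (by
        have : (st.foldl pvStepA PySem.Dict.empty).items.map Prod.fst
            = (st.foldl pvStepA PySem.Dict.empty).keys := rfl
        rw [this]; exact hnA)
    rw [hfresh]
    rw [PySem.Dict.items_eq_map_keys _ hnA ([] : List (Int × String))]
    rw [hkA]
    simp [List.map_map, Function.comp_def, PySem.Dict.empty]
  -- ===== B side =====
  have hB1 : st.foldl pvStepB0 PySem.Dict.empty
      = valid.foldl (fun d r => d.insert (pvTrip r) []) PySem.Dict.empty := by
    rw [hvdef, ← pv_foldl_guard pvValid]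
    rfl
  have hkB0 : (st.foldl pvStepB0 PySem.Dict.empty).keys = K := by
    rw [hB1]
    have := PySem.Dict.keys_foldl_insert_key valid pvTrip
      (fun _ _ => ([] : List String)) PySem.Dict.empty
    simpa using this
  have hnB0 : (st.foldl pvStepB0 PySem.Dict.empty).keys.Nodup := by
    rw [hB1]
    exact PySem.Dict.nodup_keys_foldl_insert_key valid pvTrip
      (fun _ _ => ([] : List String)) PySem.Dict.empty PySem.Dict.nodup_keys_empty
  have hgB0 : ∀ t, (st.foldl pvStepB0 PySem.Dict.empty).getD t [] = [] := by
    intro t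
    rw [hB1]
    exact pv_getD_fold_insert_nil valid pvTrip PySem.Dict.empty t (by simp)
  have hfilt : (PySem.List.sorted st pvSeq).filter pvValid = PySem.List.sorted valid pvSeq := by
    rw [hvdef]; exact pv_filter_sorted pvSeq pvValid st
  have hB2 : (PySem.List.sorted st pvSeq).foldl pvStepB (st.foldl pvStepB0 PySem.Dict.empty)
      = (PySem.List.sorted valid pvSeq).foldl
          (fun d r => d.modify (pvTrip r) [] (fun xs => xs ++ [pvStop r]))
          (st.foldl pvStepB0 PySem.Dict.empty) := by
    rw [← hfilt, ← pv_foldl_guard pvValid]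
    rfl
  have hkB : ((PySem.List.sorted st pvSeq).foldl pvStepB
      (st.foldl pvStepB0 PySem.Dict.empty)).keys = K := by
    rw [hB2]
    have := PySem.Dict.keys_foldl_modify_key (PySem.List.sorted valid pvSeq) pvTrip
      ([] : List String) (fun _ r => fun xs => xs ++ [pvStop r])
      (st.foldl pvStepB0 PySem.Dict.empty)
    rw [hkB0] at this
    rw [this]
    apply pv_update_of_subset
    intro x hx
    rcases List.mem_map.mp hx with ⟨r, hr, hrx⟩
    have hrv : r ∈ valid := (PySem.List.sorted_perm valid pvSeq false).mem_iff.mp hr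
    rw [hKdef]
    exact (PySem.Set.mem_ofList _ _).mpr (hrx ▸ List.mem_map_of_mem hrv)
  have hnB : ((PySem.List.sorted st pvSeq).foldl pvStepB
      (st.foldl pvStepB0 PySem.Dict.empty)).keys.Nodup := by
    rw [hB2]
    exact PySem.Dict.nodup_keys_foldl_modify_key _ pvTrip ([] : List String)
      (fun _ r => fun xs => xs ++ [pvStop r]) _ hnB0
  have hgB : ∀ t, ((PySem.List.sorted st pvSeq).foldl pvStepB
      (st.foldl pvStepB0 PySem.Dict.empty)).getD t []
      = ((PySem.List.sorted valid pvSeq).filter (fun r => pvTrip r == t)).map pvStop := by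
    intro t
    rw [hB2]
    have := pv_getD_fold_modify (PySem.List.sorted valid pvSeq) pvTrip pvStop
      (st.foldl pvStepB0 PySem.Dict.empty) t
    rw [hgB0 t] at this
    simpa using this
  have hBitems : build_trip_stop_sequences_alt st
      = K.map (fun t => (t,
          ((PySem.List.sorted valid pvSeq).filter (fun r => pvTrip r == t)).map pvStop)) := by
    show ((PySem.List.sorted st pvSeq).foldl pvStepB
        (st.foldl pvStepB0 PySem.Dict.empty)).items = _
    rw [PySem.Dict.items_eq_map_keys _ hnB ([] : List String), hkB]
    exact List.map_congr_left (fun t _ => by rw [hgB t])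
  -- ===== combine =====
  rw [hAitems, hBitems]
  refine List.map_congr_left (fun t _ => ?_)
  rw [hgA t]
  rw [pv_value_eq valid t]

-- ===== VERDICT (by name: the statement is the Claim_ definition above) =====
theorem build_trip_stop_sequences_spec : Claim_equal_build_trip_stop_sequences := by
  intro stop_times _
  unfold Spec_build_trip_stop_sequences
  exact pv_main stop_times
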